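-- pv_equiv track=rewrite | github.com/FitzOReilly/advent-of-code-2024 | src/day-19.py | count_possible
-- ===== SOURCE A (Python) =====
-- def count_possible(available: set[str], desired: list[str]) -> tuple[int, int]:
--     possibility_count = init_possibilities(available)
--     possible_pattern_count = 0
--     possible_combination_count = 0
--     for d in desired:
--         count = count_possibilities(set(available), possibility_count, d)
--         possible_pattern_count += 1 if count > 0 else 0
--         possible_combination_count += count
--     return possible_pattern_count, possible_combination_count
--
-- def init_possibilities(available: list[str]) -> dict:
--     possibility_count = {}
--     sorted_available = sorted(available, key=lambda a: len(a))
--     for sa in sorted_available: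
--         possibility_count[sa] = 1 + count_possibilities(
--             set(available), possibility_count, sa
--         )
--     return possibility_count
--
-- def count_possibilities(
--     available: set[str], possibility_count: dict, pattern: str
-- ) -> int:
--     if pattern == "":
--         return 1
--     if pattern in possibility_count:
--         return possibility_count[pattern]
--     count = 0
--     for length in range(1, len(pattern)):
--         if pattern[:length] in available:
--             count += count_possibilities(available, possibility_count, pattern[length:])
--     possibility_count[pattern] = count
--     return count
-- ===== SOURCE B (Python) =====
-- def count_possible(available: set[str], desired: list[str]) -> tuple[int, int]:
--     # Iterative index-based DP per desired string (no recursion, no shared memo dict):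
--     # ways[j] = number of tilings of d[j:]; computed right to left with offset
--     # startswith checks instead of substring slicing.
--     pieces = [p for p in available if p]
--     possible_pattern_count = 0
--     possible_combination_count = 0
--     for d in desired:
--         n = len(d)
--         ways = [0] * (n + 1)
--         ways[n] = 1
--         for j in range(n - 1, -1, -1):
--             total = 0
--             for p in pieces:
--                 e = j + len(p)
--                 if e <= n and d.startswith(p, j):
--                     total += ways[e]
--             ways[j] = total
--         w = ways[0]
--         possible_pattern_count += 1 if w > 0 else 0
--         possible_combination_count += w
--     return possible_pattern_count, possible_combination_count
-- ===== Notes on version B (the rewrite author's own statement) =====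
-- stated objective: alternative
-- what changed: Replaces A's memoized recursion on substring slices with a shared cross-string cache (built by pre-seeding every available towel, sorted by length) by a self-contained backward index DP per desired string: ways[j] = tilings of d[j:], filled iteratively with offset startswith checks, no recursion, no dict and no slicing.
import Mathlib
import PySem

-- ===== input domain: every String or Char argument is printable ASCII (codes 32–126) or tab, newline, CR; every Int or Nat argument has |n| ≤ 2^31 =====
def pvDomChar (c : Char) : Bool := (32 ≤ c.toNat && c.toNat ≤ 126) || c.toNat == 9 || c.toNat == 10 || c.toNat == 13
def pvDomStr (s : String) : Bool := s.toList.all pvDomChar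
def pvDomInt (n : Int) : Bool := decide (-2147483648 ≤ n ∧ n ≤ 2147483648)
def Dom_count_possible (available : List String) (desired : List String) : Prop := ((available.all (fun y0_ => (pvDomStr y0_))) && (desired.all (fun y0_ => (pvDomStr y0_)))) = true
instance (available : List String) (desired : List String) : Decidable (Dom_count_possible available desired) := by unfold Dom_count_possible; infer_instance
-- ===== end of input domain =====

-- B replaces A's memoized recursion on substring slices (with a cross-string cache
-- pre-seeded from the sorted towel list) by a self-contained backward index DP per
-- desired string; objective: alternative (different algorithm, no shared memo state).

-- ===== PORT A =====
-- count_possibilities(available, possibility_count, pattern): the memo dict is threaded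
-- as explicit state (Python mutates it in place).  range(1, len(pattern)) is
-- List.range' 1 (pattern.length - 1); `.attach` is only the termination device
-- (the folded function uses the element value alone).
def cpRec (avail : List (List Char)) (pattern : List Char)
    (pc : PySem.Dict (List Char) Int) : Int × PySem.Dict (List Char) Int :=
  if hpat : pattern = [] then (1, pc)
  else
    match pc.get? pattern with
    | some v => (v, pc)
    | none =>
      let r := (List.range' 1 (pattern.length - 1)).attach.foldl
        (fun (st : Int × PySem.Dict (List Char) Int) l =>
          if avail.contains (pattern.take l.1) then
            let q := cpRec avail (pattern.drop l.1) st.2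
            (st.1 + q.1, q.2)
          else st)
        (0, pc)
      (r.1, r.2.insert pattern r.1)
termination_by pattern.length
decreasing_by
  have hl := List.mem_range'_1.mp l.2
  have : pattern.length ≠ 0 := fun h => hpat (List.eq_nil_of_length_eq_zero h)
  simp only [List.length_drop]; omega

-- init_possibilities(available)
def initPoss (avail : List (List Char)) : PySem.Dict (List Char) Int :=
  (PySem.List.sorted avail (fun a => (a.length : Int)) false).foldl
    (fun pc sa =>
      let q := cpRec avail sa pc
      q.2.insert sa (1 + q.1))
    PySem.Dict.empty

def count_possible (available : List String) (desired : List String) : Int × Int :=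
  let avail := available.map String.toList
  let r := desired.foldl
    (fun (st : Int × Int × PySem.Dict (List Char) Int) d =>
      let q := cpRec avail d.toList st.2.2
      (st.1 + (if q.1 > 0 then 1 else 0), st.2.1 + q.1, q.2))
    ((0 : Int), (0 : Int), initPoss avail)
  (r.1, r.2.1)

-- ===== PORT B =====
-- ways[j] = number of tilings of d[j:]; built right to left: the returned list is
-- [ways[j], ways[j+1], …, ways[n]] for the suffix starting at j.  ways[j + len p] is
-- ws[len p - 1]; `d.startswith(p, j) and j + len p <= n` is the take/length test.
def altWaysList (pieces : List (List Char)) : List Char → List Int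
  | [] => [1]
  | c :: t =>
    let ws := altWaysList pieces t
    (pieces.foldl
      (fun total p =>
        if p.length ≤ t.length + 1 ∧ (c :: t).take p.length = p then
          total + ws.getD (p.length - 1) 0
        else total)
      0) :: ws

def count_possible_alt (available : List String) (desired : List String) : Int × Int :=
  let pieces := (available.map String.toList).filter (fun p => !p.isEmpty)
  desired.foldl
    (fun (st : Int × Int) d =>
      let w := (altWaysList pieces d.toList).headD 0
      (st.1 + (if w > 0 then 1 else 0), st.2 + w))
    ((0 : Int), (0 : Int))

-- ===== PRECONDITION & SPEC =====
-- `available` is a Python set[str]; its List-of-distinct-elements encoding never has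
-- duplicates, so Pre_ excludes lists with repeated elements (no Python input produces them).
def Pre_count_possible (available : List String) (desired : List String) : Prop :=
  available.Nodup
instance (available : List String) (desired : List String) : Decidable (Pre_count_possible available desired) := by unfold Pre_count_possible; infer_instance

def pvWitness_count_possible : List String × List String := (["r", "wr", "b", "g", "bwu", "rb", "gb", "br"], ["brwrr", "bggr", "gbbr", "rrbgbr", "ubwu", "bwurrg", "brgr", "bbrgwb"])

def Spec_count_possible (available : List String) (desired : List String) (out : Int × Int) : Prop := out = count_possible_alt available desired
instance (available : List String) (desired : List String) (out : Int × Int) : Decidable (Spec_count_possible available desired out) := by unfold Spec_count_possible; infer_instance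

-- ===== CLAIM (what is proved, stated in full; the proofs are below) =====
def Claim_equal_count_possible : Prop := ∀ (available : List String) (desired : List String), Dom_count_possible available desired → Pre_count_possible available desired → Spec_count_possible available desired (count_possible available desired)

-- ===== LEMMAS AND PROOFS =====

-- the nonempty towels, and W t = B's tiling count of t (head of the backward DP table)
def piecesOf (avail : List (List Char)) : List (List Char) :=
  avail.filter (fun p => !p.isEmpty)

def Wv (avail : List (List Char)) (t : List Char) : Int :=
  (altWaysList (piecesOf avail) t).headD 0

lemma awl_drop (ps : List (List Char)) :
    ∀ (t : List Char) (j : Nat), j ≤ t.length →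
      (altWaysList ps t).drop j = altWaysList ps (t.drop j) := by
  intro t
  induction t with
  | nil =>
    intro j hj
    have hj0 : j = 0 := Nat.le_zero.mp (by simpa using hj)
    subst hj0; simp
  | cons c t ih =>
    intro j hj
    cases j with
    | zero => simp
    | succ k =>
      have hk : k ≤ t.length := by simpa using hj
      simp [altWaysList, ih k hk]

lemma awl_getD (ps : List (List Char)) (t : List Char) (j : Nat) (hj : j ≤ t.length) :
    (altWaysList ps t).getD j 0 = (altWaysList ps (t.drop j)).headD 0 := by
  rw [List.getD_eq_getElem?_getD, ← List.head?_drop, awl_drop ps t j hj, List.headD_eq_head?_getD]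

lemma foldl_if_add {α : Type} (f : α → Int) (c : α → Prop) [DecidablePred c] :
    ∀ (L : List α) (a : Int),
      L.foldl (fun t x => if c x then t + f x else t) a
        = a + (L.map (fun x => if c x then f x else 0)).sum := by
  intro L
  induction L with
  | nil => simp
  | cons x L ih =>
    intro a
    by_cases hx : c x <;> simp [hx, ih, add_assoc]

lemma W_cons (avail : List (List Char)) (c : Char) (t : List Char) :
    Wv avail (c :: t)
      = ((piecesOf avail).map
          (fun p => if p.length ≤ t.length + 1 ∧ (c :: t).take p.length = p
                    then Wv avail ((c :: t).drop p.length) else 0)).sum := by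
  have hne : ∀ p ∈ piecesOf avail, p ≠ [] := by
    intro p hp
    have := List.of_mem_filter hp
    simpa using this
  show (altWaysList (piecesOf avail) (c :: t)).headD 0 = _
  rw [altWaysList]
  simp only [List.headD_cons]
  rw [foldl_if_add (fun p => (altWaysList (piecesOf avail) t).getD (p.length - 1) 0)
      (fun p => p.length ≤ t.length + 1 ∧ (c :: t).take p.length = p)]
  rw [zero_add]
  congr 1
  apply List.map_congr_left
  intro p hp
  by_cases hc : p.length ≤ t.length + 1 ∧ (c :: t).take p.length = p
  · have hplen : 1 ≤ p.length := by
      have := hne p hp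
      cases p with
      | nil => exact absurd rfl this
      | cons a q => simp
    simp only [hc]
    rw [awl_getD _ t (p.length - 1) (by omega)]
    have hdrop : t.drop (p.length - 1) = (c :: t).drop p.length := by
      cases p with
      | nil => simp at hplen
      | cons a q => simp
    rw [hdrop]
    rfl
  · simp [hc]

lemma sum_ite_eq_of_nodup (v : Int) :
    ∀ (L : List Nat) (k : Nat), L.Nodup → k ∈ L →
      (L.map (fun l => if l = k then v else 0)).sum = v := by
  intro L
  induction L with
  | nil => intro k _ hk; simp at hk
  | cons x L ih =>
    intro k hnd hk
    have hx := (List.nodup_cons.mp hnd).1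
    have hL := (List.nodup_cons.mp hnd).2
    simp only [List.map_cons, List.sum_cons]
    rcases List.mem_cons.mp hk with h | h
    · have hz : (L.map (fun l => if l = k then v else (0 : Int))).sum = 0 := by
        apply List.sum_eq_zero
        intro y hy
        obtain ⟨l, hl, rfl⟩ := List.mem_map.mp hy
        have hlk : l ≠ k := fun he => hx (h ▸ he ▸ hl)
        simp [hlk]
      rw [if_pos h.symm, hz, add_zero]
    · have hxk : x ≠ k := fun he => hx (he ▸ h)
      rw [if_neg hxk, ih k hL h, zero_add]

lemma reindex (F : Nat → Int) (pattern : List Char) :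
    ∀ (ps : List (List Char)), ps.Nodup → (∀ p ∈ ps, p ≠ []) →
      (ps.map (fun p => if p.length ≤ pattern.length ∧ pattern.take p.length = p
                        then F p.length else 0)).sum
        = ((List.range' 1 pattern.length).map
            (fun l => if pattern.take l ∈ ps then F l else 0)).sum := by
  intro ps
  induction ps with
  | nil => simp
  | cons p ps ih =>
    intro hnd hne
    have hnd' := (List.nodup_cons.mp hnd).2
    have hne' : ∀ q ∈ ps, q ≠ [] := fun q hq => hne q (List.mem_cons_of_mem _ hq)
    by_cases hc : p.length ≤ pattern.length ∧ pattern.take p.length = p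
    · -- p is a nonempty prefix of pattern; it contributes exactly at l = p.length
      have hp0 : p ≠ [] := hne p (List.mem_cons_self ..)
      have hplen : 1 ≤ p.length := by
        cases p with
        | nil => exact absurd rfl hp0
        | cons a q => simp
      have hmem : p.length ∈ List.range' 1 pattern.length :=
        List.mem_range'_1.mpr (by omega)
      have hptw : ∀ l ∈ List.range' 1 pattern.length,
          (if pattern.take l ∈ p :: ps then F l else 0)
            = (if pattern.take l ∈ ps then F l else 0)
              + (if l = p.length then F p.length else 0) := by
        intro l hl
        have hlb := List.mem_range'_1.mp hl
        have hlen : (pattern.take l).length = l := by rw [List.length_take]; omega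
        by_cases hlp : l = p.length
        · have hpe : pattern.take l = p := by rw [hlp]; exact hc.2
          have hnm : ¬ pattern.take l ∈ ps := by
            rw [hpe]; exact (List.nodup_cons.mp hnd).1
          rw [if_pos (List.mem_cons.mpr (Or.inl hpe)), if_neg hnm, if_pos hlp, hlp, zero_add]
        · have hne2 : pattern.take l ≠ p := by
            intro he
            apply hlp
            have h2 : (pattern.take l).length = p.length := by rw [he]
            rw [hlen] at h2; exact h2
          rw [if_neg hlp, add_zero]
          by_cases hm : pattern.take l ∈ ps
          · rw [if_pos (List.mem_cons.mpr (Or.inr hm)), if_pos hm]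
          · have : ¬ pattern.take l ∈ p :: ps := by
              simp [List.mem_cons, hne2, hm]
            rw [if_neg this, if_neg hm]
      calc (((p :: ps).map (fun q => if q.length ≤ pattern.length ∧ pattern.take q.length = q
                        then F q.length else 0)).sum)
          = (if p.length ≤ pattern.length ∧ pattern.take p.length = p then F p.length else 0)
            + (ps.map (fun q => if q.length ≤ pattern.length ∧ pattern.take q.length = q
                        then F q.length else 0)).sum := by simp
        _ = F p.length + ((List.range' 1 pattern.length).map
              (fun l => if pattern.take l ∈ ps then F l else 0)).sum := by
              rw [ih hnd' hne', if_pos hc]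
        _ = ((List.range' 1 pattern.length).map
              (fun l => if pattern.take l ∈ p :: ps then F l else 0)).sum := by
              rw [List.map_congr_left hptw,
                PySem.List.sum_map_add_int (List.range' 1 pattern.length)
                  (fun l => if pattern.take l ∈ ps then F l else 0)
                  (fun l => if l = p.length then F p.length else 0),
                sum_ite_eq_of_nodup (F p.length) _ p.length List.nodup_range' hmem]
              ring
    · -- p never matches a prefix of length 1..n
      have hptw : ∀ l ∈ List.range' 1 pattern.length,
          (if pattern.take l ∈ p :: ps then F l else 0)
            = (if pattern.take l ∈ ps then F l else 0) := by
        intro l hl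
        have hlb := List.mem_range'_1.mp hl
        have hne2 : pattern.take l ≠ p := by
          intro he
          apply hc
          have hlen : (pattern.take l).length = l := by
            rw [List.length_take]; omega
          constructor
          · rw [← he, hlen]; omega
          · rw [← he, hlen, he]
        by_cases hm : pattern.take l ∈ ps
        · rw [if_pos (List.mem_cons.mpr (Or.inr hm)), if_pos hm]
        · have : ¬ pattern.take l ∈ p :: ps := by simp [List.mem_cons, hne2, hm]
          rw [if_neg this, if_neg hm]
      rw [List.map_congr_left hptw, ← ih hnd' hne']
      simp [hc]

-- W's recurrence in A's shape: sum over split lengths 1..n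
lemma W_full (avail : List (List Char)) (hnd : (piecesOf avail).Nodup)
    (pattern : List Char) (hpat : pattern ≠ []) :
    Wv avail pattern
      = ((List.range' 1 pattern.length).map
          (fun l => if pattern.take l ∈ avail then Wv avail (pattern.drop l) else 0)).sum := by
  obtain ⟨c, t, rfl⟩ := List.exists_cons_of_ne_nil hpat
  rw [W_cons]
  have hne : ∀ p ∈ piecesOf avail, p ≠ [] := by
    intro p hp
    have := List.of_mem_filter hp
    simpa using this
  have hlc : (c :: t).length = t.length + 1 := by simp
  rw [show t.length + 1 = (c :: t).length from hlc.symm] at *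
  rw [reindex (fun l => Wv avail ((c :: t).drop l)) (c :: t) (piecesOf avail) hnd hne]
  apply congrArg
  apply List.map_congr_left
  intro l hl
  have hlb := List.mem_range'_1.mp hl
  have hmem : (c :: t).take l ∈ piecesOf avail ↔ (c :: t).take l ∈ avail := by
    constructor
    · intro h; exact List.mem_of_mem_filter h
    · intro h
      apply List.mem_filter.mpr
      refine ⟨h, ?_⟩
      have : ((c :: t).take l).length = l := by
        rw [List.length_take]; simp at hlb ⊢; omega
      simp only [Bool.not_eq_true', List.isEmpty_eq_false_iff]
      intro he
      rw [he] at this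
      simp at this
      omega
  by_cases hm : (c :: t).take l ∈ avail
  · simp [hmem.mpr hm, hm]
  · rw [if_neg (fun h => hm (hmem.mp h)), if_neg hm]

-- A's inner loop sum (lengths 1..n-1) = W pattern minus the whole-pattern piece
lemma W_split (avail : List (List Char)) (hnd : (piecesOf avail).Nodup)
    (pattern : List Char) (hpat : pattern ≠ []) :
    ((List.range' 1 (pattern.length - 1)).map
        (fun l => if pattern.take l ∈ avail then Wv avail (pattern.drop l) else 0)).sum
      = Wv avail pattern - (if pattern ∈ avail then 1 else 0) := by
  have hlen : 1 ≤ pattern.length := by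
    cases pattern with
    | nil => exact absurd rfl hpat
    | cons a q => simp
  have hsplit : List.range' 1 pattern.length
      = List.range' 1 (pattern.length - 1) ++ [pattern.length] := by
    have : pattern.length = (pattern.length - 1) + 1 := by omega
    rw [this, List.range'_concat]
    congr 2
    omega
  rw [W_full avail hnd pattern hpat, hsplit]
  have hterm : (if pattern.take pattern.length ∈ avail then Wv avail (pattern.drop pattern.length) else 0)
      = (if pattern ∈ avail then 1 else 0) := by
    rw [List.take_length, List.drop_length]
    by_cases hm : pattern ∈ avail <;> simp [hm, Wv, altWaysList]
  rw [List.map_append, List.sum_append]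
  simp only [List.map_cons, List.map_nil, List.sum_cons, List.sum_nil, add_zero, hterm]
  ring

-- ===== invariants for A's memo dict =====

def DInv (avail : List (List Char)) (pc : PySem.Dict (List Char) Int) : Prop :=
  ∀ k v, pc.get? k = some v → k ≠ [] → v = Wv avail k

def DCov (avail : List (List Char)) (pc : PySem.Dict (List Char) Int) (n : Nat) : Prop :=
  ∀ p ∈ avail, p.length < n → (pc.get? p).isSome

-- value returned by count_possibilities
def cpVal (avail : List (List Char)) (pattern : List Char)
    (pc : PySem.Dict (List Char) Int) : Int :=
  if pattern = [] then 1
  else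
    match pc.get? pattern with
    | some v => v
    | none => Wv avail pattern - (if pattern ∈ avail then 1 else 0)

def cpPost (avail : List (List Char)) (pattern : List Char)
    (pc pc' : PySem.Dict (List Char) Int) : Prop :=
  (∀ k v, pc.get? k = some v → pc'.get? k = some v) ∧
  (∀ k v, pc'.get? k = some v →
    pc.get? k = some v ∨ (k ≠ [] ∧ k ∉ avail ∧ v = Wv avail k) ∨
    (k = pattern ∧ pc.get? pattern = none ∧ k ≠ [] ∧
      v = Wv avail pattern - (if pattern ∈ avail then 1 else 0)))

-- one step of A's inner loop over split lengths
def cpStep (avail : List (List Char)) (pattern : List Char) :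
    Int × PySem.Dict (List Char) Int → Nat → Int × PySem.Dict (List Char) Int :=
  fun st l =>
    if avail.contains (pattern.take l) then
      let q := cpRec avail (pattern.drop l) st.2
      (st.1 + q.1, q.2)
    else st

lemma cpLoop_spec (avail : List (List Char)) (pattern : List Char)
    (IH : ∀ (t : List Char) (pc : PySem.Dict (List Char) Int),
      t.length < pattern.length → DInv avail pc → DCov avail pc t.length →
      (cpRec avail t pc).1 = cpVal avail t pc ∧ cpPost avail t pc (cpRec avail t pc).2) :
    ∀ (L : List Nat), (∀ l ∈ L, 1 ≤ l ∧ l < pattern.length) →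
    ∀ (acc : Int) (pc : PySem.Dict (List Char) Int),
      DInv avail pc → DCov avail pc pattern.length →
      (L.foldl (cpStep avail pattern) (acc, pc)).1
          = acc + (L.map (fun l => if pattern.take l ∈ avail
                                   then Wv avail (pattern.drop l) else 0)).sum
      ∧ (∀ k v, pc.get? k = some v →
          (L.foldl (cpStep avail pattern) (acc, pc)).2.get? k = some v)
      ∧ (∀ k v, (L.foldl (cpStep avail pattern) (acc, pc)).2.get? k = some v →
          pc.get? k = some v ∨ (k ≠ [] ∧ k ∉ avail ∧ v = Wv avail k)) := by
  intro L
  induction L with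
  | nil =>
    intro _ acc pc hinv hcov
    refine ⟨by simp, fun k v h => h, fun k v h => Or.inl h⟩
  | cons l L ihL =>
    intro hbound acc pc hinv hcov
    have hb := hbound l (List.mem_cons_self ..)
    have hbound' : ∀ x ∈ L, 1 ≤ x ∧ x < pattern.length :=
      fun x hx => hbound x (List.mem_cons_of_mem _ hx)
    by_cases hcont : avail.contains (pattern.take l)
    · have hmem : pattern.take l ∈ avail := List.contains_iff_mem.mp hcont
      have hdl : (pattern.drop l).length < pattern.length := by
        simp only [List.length_drop]; omega
      have hdne : pattern.drop l ≠ [] := by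
        intro he
        have := congrArg List.length he
        simp only [List.length_drop, List.length_nil] at this
        omega
      have hcov' : DCov avail pc (pattern.drop l).length :=
        fun p hp hlen => hcov p hp (lt_trans hlen hdl)
      obtain ⟨hval, hmono, hnew⟩ := IH (pattern.drop l) pc hdl hinv hcov'
      have hq1 : (cpRec avail (pattern.drop l) pc).1 = Wv avail (pattern.drop l) := by
        rw [hval]
        unfold cpVal
        rw [if_neg hdne]
        cases hg : pc.get? (pattern.drop l) with
        | some v =>
          show v = Wv avail (pattern.drop l)
          exact hinv _ v hg hdne
        | none =>
          have hnotav : pattern.drop l ∉ avail := by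
            intro hin
            have := hcov (pattern.drop l) hin hdl
            rw [hg] at this
            simp at this
          show Wv avail (pattern.drop l) - (if pattern.drop l ∈ avail then 1 else 0)
              = Wv avail (pattern.drop l)
          rw [if_neg hnotav, sub_zero]
      -- the returned dict keeps the invariants
      have hnew' : ∀ k v, (cpRec avail (pattern.drop l) pc).2.get? k = some v →
          pc.get? k = some v ∨ (k ≠ [] ∧ k ∉ avail ∧ v = Wv avail k) := by
        intro k v hk
        rcases hnew k v hk with h | h | h
        · exact Or.inl h
        · exact Or.inr h
        · obtain ⟨hk1, hk2, hk3, hk4⟩ := h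
          right
          have hnotav : pattern.drop l ∉ avail := by
            intro hin
            have := hcov (pattern.drop l) hin hdl
            rw [hk2] at this
            simp at this
          refine ⟨hk3, by rw [hk1]; exact hnotav, ?_⟩
          rw [hk4, hk1, if_neg hnotav, sub_zero]
      have hinv' : DInv avail (cpRec avail (pattern.drop l) pc).2 := by
        intro k v hk hke
        rcases hnew' k v hk with h | h
        · exact hinv k v h hke
        · exact h.2.2
      have hcov2 : DCov avail (cpRec avail (pattern.drop l) pc).2 pattern.length := by
        intro p hp hlen
        have := hcov p hp hlen
        obtain ⟨v, hv⟩ := Option.isSome_iff_exists.mp this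
        rw [hmono p v hv]
        rfl
      have hstep : cpStep avail pattern (acc, pc) l
          = (acc + Wv avail (pattern.drop l), (cpRec avail (pattern.drop l) pc).2) := by
        simp only [cpStep, hcont, if_true]
        rw [hq1]
      obtain ⟨ih1, ih2, ih3⟩ := ihL hbound' (acc + Wv avail (pattern.drop l))
        (cpRec avail (pattern.drop l) pc).2 hinv' hcov2
      refine ⟨?_, ?_, ?_⟩
      · rw [List.foldl_cons, hstep, ih1]
        simp only [List.map_cons, List.sum_cons, if_pos hmem]
        ring
      · intro k v hk
        rw [List.foldl_cons, hstep]
        exact ih2 k v (hmono k v hk)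
      · intro k v hk
        rw [List.foldl_cons, hstep] at hk
        rcases ih3 k v hk with h | h
        · exact hnew' k v h
        · exact Or.inr h
    · have hmem : pattern.take l ∉ avail :=
        fun h => hcont (List.contains_iff_mem.mpr h)
      have hstep : cpStep avail pattern (acc, pc) l = (acc, pc) := by
        simp only [cpStep, if_neg hcont]
      obtain ⟨ih1, ih2, ih3⟩ := ihL hbound' acc pc hinv hcov
      refine ⟨?_, ?_, ?_⟩
      · rw [List.foldl_cons, hstep, ih1]
        simp [hmem]
      · intro k v hk
        rw [List.foldl_cons, hstep]
        exact ih2 k v hk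
      · intro k v hk
        rw [List.foldl_cons, hstep] at hk
        exact ih3 k v hk

lemma cpRec_spec (avail : List (List Char)) (hnd : (piecesOf avail).Nodup) :
    ∀ (n : Nat) (pattern : List Char) (pc : PySem.Dict (List Char) Int),
      pattern.length ≤ n → DInv avail pc → DCov avail pc pattern.length →
      (cpRec avail pattern pc).1 = cpVal avail pattern pc ∧
      cpPost avail pattern pc (cpRec avail pattern pc).2 := by
  intro n
  induction n with
  | zero =>
    intro pattern pc hlen hinv hcov
    have hpat : pattern = [] := List.eq_nil_of_length_eq_zero (Nat.le_zero.mp hlen)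
    subst hpat
    rw [cpRec]
    exact ⟨by simp [cpVal], fun k v h => h, fun k v h => Or.inl h⟩
  | succ n ihn =>
    intro pattern pc hlen hinv hcov
    by_cases hpat : pattern = []
    · subst hpat
      rw [cpRec]
      exact ⟨by simp [cpVal], fun k v h => h, fun k v h => Or.inl h⟩
    · have IH : ∀ (t : List Char) (pc' : PySem.Dict (List Char) Int),
          t.length < pattern.length → DInv avail pc' → DCov avail pc' t.length →
          (cpRec avail t pc').1 = cpVal avail t pc' ∧
          cpPost avail t pc' (cpRec avail t pc').2 :=
        fun t pc' hlt => ihn t pc' (by omega)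
      rw [cpRec]
      simp only [dif_neg hpat]
      cases hg : pc.get? pattern with
      | some v =>
        refine ⟨?_, fun k v h => h, fun k v h => Or.inl h⟩
        simp [cpVal, hpat, hg]
      | none =>
        have hfold : (List.range' 1 (pattern.length - 1)).attach.foldl
            (fun (st : Int × PySem.Dict (List Char) Int) l =>
              if avail.contains (pattern.take l.1) then
                let q := cpRec avail (pattern.drop l.1) st.2
                (st.1 + q.1, q.2)
              else st) (0, pc)
            = (List.range' 1 (pattern.length - 1)).foldl (cpStep avail pattern) (0, pc) :=
          List.foldl_attach (f := cpStep avail pattern)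
        have hplen : 1 ≤ pattern.length := by
          cases pattern with
          | nil => exact absurd rfl hpat
          | cons a q => simp
        have hbound : ∀ l ∈ List.range' 1 (pattern.length - 1), 1 ≤ l ∧ l < pattern.length := by
          intro l hl
          have := List.mem_range'_1.mp hl
          omega
        obtain ⟨h1, h2, h3⟩ := cpLoop_spec avail pattern IH
          (List.range' 1 (pattern.length - 1)) hbound 0 pc hinv hcov
        have hsum : ((List.range' 1 (pattern.length - 1)).foldl (cpStep avail pattern) (0, pc)).1
            = Wv avail pattern - (if pattern ∈ avail then 1 else 0) := by
          rw [h1, zero_add, W_split avail hnd pattern hpat]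
        simp only [hfold]
        constructor
        · simpa [cpVal, hpat, hg] using hsum
        · constructor
          · intro k v hk
            have hkp : k ≠ pattern := by
              intro he
              rw [he, hg] at hk
              simp at hk
            rw [PySem.Dict.get?_insert_of_ne _ _ hkp]
            exact h2 k v hk
          · intro k v hk
            by_cases hkp : k = pattern
            · subst hkp
              rw [PySem.Dict.get?_insert_self] at hk
              right; right
              exact ⟨rfl, hg, hpat, by rw [← Option.some_inj.mp hk, hsum]⟩
            · rw [PySem.Dict.get?_insert_of_ne _ _ hkp] at hk
              rcases h3 k v hk with h | h
              · exact Or.inl h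
              · exact Or.inr (Or.inl h)

def JInv (avail : List (List Char)) (pc : PySem.Dict (List Char) Int)
    (done : List (List Char)) : Prop :=
  DInv avail pc ∧ (∀ p ∈ done, (pc.get? p).isSome) ∧
  (∀ k, (pc.get? k).isSome → k ∈ done ∨ k ∉ avail)

def initStep (avail : List (List Char)) :
    PySem.Dict (List Char) Int → List Char → PySem.Dict (List Char) Int :=
  fun pc sa =>
    let q := cpRec avail sa pc
    q.2.insert sa (1 + q.1)

lemma initFold_spec (avail : List (List Char)) (hnd : avail.Nodup)
    (hpnd : (piecesOf avail).Nodup) :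
    ∀ (r done : List (List Char)) (pc : PySem.Dict (List Char) Int),
      PySem.List.sorted avail (fun a => (a.length : Int)) false = done ++ r →
      JInv avail pc done →
      JInv avail (r.foldl (initStep avail) pc) (done ++ r) := by
  intro r
  induction r with
  | nil =>
    intro done pc _ hJ
    simpa using hJ
  | cons sa r' ih =>
    intro done pc hsorted hJ
    obtain ⟨hinv, hdone, hclose⟩ := hJ
    have hnds : (done ++ sa :: r').Nodup := by
      rw [← hsorted]
      exact ((PySem.List.sorted_perm avail _ _).nodup_iff).mpr hnd
    have hsa_avail : sa ∈ avail := by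
      have : sa ∈ PySem.List.sorted avail (fun a => (a.length : Int)) false := by
        rw [hsorted]
        exact List.mem_append_right _ (List.mem_cons_self ..)
      exact (PySem.List.mem_sorted avail _ _ sa).mp this
    have hsa_not_done : sa ∉ done := by
      intro hin
      exact List.disjoint_of_nodup_append hnds hin (List.mem_cons_self ..)
    have hpair : (done ++ sa :: r').Pairwise
        (fun a b => ((a.length : Int)) ≤ (b.length : Int)) := by
      rw [← hsorted]
      exact PySem.List.sorted_pairwise avail _
    have hcov : DCov avail pc sa.length := by
      intro p hp hplen
      have hpmem : p ∈ done ++ sa :: r' := by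
        rw [← hsorted]
        exact (PySem.List.mem_sorted avail _ _ p).mpr hp
      rcases List.mem_append.mp hpmem with h | h
      · exact hdone p h
      · rcases List.mem_cons.mp h with h | h
        · subst h; omega
        · have := (List.pairwise_cons.mp (List.pairwise_append.mp hpair).2.1).1 p h
          have : sa.length ≤ p.length := by exact_mod_cast this
          omega
    have hnone : pc.get? sa = none := by
      cases hg : pc.get? sa with
      | none => rfl
      | some v =>
        rcases hclose sa (by rw [hg]; rfl) with h | h
        · exact absurd h hsa_not_done
        · exact absurd hsa_avail h
    obtain ⟨hval, hmono, hnew⟩ := cpRec_spec avail hpnd sa.length sa pc le_rfl hinv hcov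
    have hstep : (sa :: r').foldl (initStep avail) pc
        = r'.foldl (initStep avail) ((cpRec avail sa pc).2.insert sa (1 + (cpRec avail sa pc).1)) := by
      rw [List.foldl_cons]
      rfl
    have hq1 : sa ≠ [] → (cpRec avail sa pc).1 = Wv avail sa - 1 := by
      intro hne
      rw [hval]
      simp only [cpVal, if_neg hne, hnone, if_pos hsa_avail]
    set pc1 := (cpRec avail sa pc).2.insert sa (1 + (cpRec avail sa pc).1) with hpc1
    have hJ1 : JInv avail pc1 (done ++ [sa]) := by
      refine ⟨?_, ?_, ?_⟩
      · intro k v hget hke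
        by_cases hk : k = sa
        · subst hk
          rw [hpc1, PySem.Dict.get?_insert_self] at hget
          rw [← Option.some_inj.mp hget, hq1 hke]
          ring
        · rw [hpc1, PySem.Dict.get?_insert_of_ne _ _ hk] at hget
          rcases hnew k v hget with h | h | h
          · exact hinv k v h hke
          · exact h.2.2
          · exact absurd h.1 hk
      · intro p hp
        rcases List.mem_append.mp hp with h | h
        · obtain ⟨v, hv⟩ := Option.isSome_iff_exists.mp (hdone p h)
          have hpsa : p ≠ sa := fun he => hsa_not_done (he ▸ h)
          rw [hpc1, PySem.Dict.get?_insert_of_ne _ _ hpsa, hmono p v hv]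
          rfl
        · have : p = sa := by simpa using h
          subst this
          rw [hpc1, PySem.Dict.get?_insert_self]
          rfl
      · intro k hk
        by_cases hks : k = sa
        · subst hks
          exact Or.inl (List.mem_append_right _ (List.mem_cons_self ..))
        · rw [hpc1, PySem.Dict.get?_insert_of_ne _ _ hks] at hk
          obtain ⟨v, hv⟩ := Option.isSome_iff_exists.mp hk
          rcases hnew k v hv with h | h | h
          · rcases hclose k (by rw [h]; rfl) with hh | hh
            · exact Or.inl (List.mem_append_left _ hh)
            · exact Or.inr hh
          · exact Or.inr h.2.1
          · exact absurd h.1 hks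
    have hs2 : PySem.List.sorted avail (fun a => (a.length : Int)) false
        = (done ++ [sa]) ++ r' := by
      rw [hsorted]
      simp
    have := ih (done ++ [sa]) pc1 hs2 hJ1
    rw [hstep]
    have hdd : (done ++ [sa]) ++ r' = done ++ sa :: r' := by simp
    rw [hdd] at this
    exact this

lemma initPoss_spec (avail : List (List Char)) (hnd : avail.Nodup)
    (hpnd : (piecesOf avail).Nodup) :
    DInv avail (initPoss avail) ∧ ∀ p ∈ avail, ((initPoss avail).get? p).isSome := by
  have hJ0 : JInv avail PySem.Dict.empty [] := by
    refine ⟨?_, ?_, ?_⟩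
    · intro k v h
      rw [PySem.Dict.get?_empty] at h
      simp at h
    · intro p hp; simp at hp
    · intro k hk
      rw [PySem.Dict.get?_empty] at hk
      simp at hk
  have := initFold_spec avail hnd hpnd
    (PySem.List.sorted avail (fun a => (a.length : Int)) false) [] PySem.Dict.empty
    (by simp) hJ0
  simp only [List.nil_append] at this
  obtain ⟨hinv, hcov, _⟩ := this
  refine ⟨hinv, ?_⟩
  intro p hp
  exact hcov p ((PySem.List.mem_sorted avail _ _ p).mpr hp)

lemma desired_spec (avail : List (List Char)) (hpnd : (piecesOf avail).Nodup) :
    ∀ (ds : List String) (pp cc : Int) (pc : PySem.Dict (List Char) Int),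
      DInv avail pc → (∀ p ∈ avail, (pc.get? p).isSome) →
      ((ds.foldl (fun (st : Int × Int × PySem.Dict (List Char) Int) d =>
          let q := cpRec avail d.toList st.2.2
          (st.1 + (if q.1 > 0 then 1 else 0), st.2.1 + q.1, q.2)) (pp, cc, pc)).1,
       (ds.foldl (fun (st : Int × Int × PySem.Dict (List Char) Int) d =>
          let q := cpRec avail d.toList st.2.2
          (st.1 + (if q.1 > 0 then 1 else 0), st.2.1 + q.1, q.2)) (pp, cc, pc)).2.1)
      = ds.foldl (fun (st : Int × Int) d =>
          let w := Wv avail d.toList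
          (st.1 + (if w > 0 then 1 else 0), st.2 + w)) (pp, cc) := by
  intro ds
  induction ds with
  | nil => intro pp cc pc _ _; rfl
  | cons d ds ih =>
    intro pp cc pc hinv hall
    have hcov : DCov avail pc d.toList.length := fun p hp _ => hall p hp
    obtain ⟨hval, hmono, hnew⟩ := cpRec_spec avail hpnd d.toList.length d.toList pc le_rfl hinv hcov
    have hq1 : (cpRec avail d.toList pc).1 = Wv avail d.toList := by
      rw [hval]
      by_cases hne : d.toList = []
      · rw [hne]
        simp [cpVal, Wv, altWaysList]
      · simp only [cpVal, if_neg hne]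
        cases hg : pc.get? d.toList with
        | some v =>
          show v = Wv avail d.toList
          exact hinv _ v hg hne
        | none =>
          have hnotav : d.toList ∉ avail := by
            intro hin
            have := hall d.toList hin
            rw [hg] at this
            simp at this
          show Wv avail d.toList - (if d.toList ∈ avail then 1 else 0) = Wv avail d.toList
          rw [if_neg hnotav, sub_zero]
    have hinv' : DInv avail (cpRec avail d.toList pc).2 := by
      intro k v hk hke
      rcases hnew k v hk with h | h | h
      · exact hinv k v h hke
      · exact h.2.2
      · obtain ⟨hk1, hk2, _, hk4⟩ := h
        have hnotav : d.toList ∉ avail := by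
          intro hin
          have := hall d.toList hin
          rw [hk2] at this
          simp at this
        rw [hk4, hk1, if_neg hnotav, sub_zero]
    have hall' : ∀ p ∈ avail, ((cpRec avail d.toList pc).2.get? p).isSome := by
      intro p hp
      obtain ⟨v, hv⟩ := Option.isSome_iff_exists.mp (hall p hp)
      rw [hmono p v hv]
      rfl
    simp only [List.foldl_cons]
    rw [hq1]
    exact ih _ _ _ hinv' hall'

-- ===== VERDICT (by name: the statement is the Claim_ definition above) =====
theorem count_possible_spec : Claim_equal_count_possible := by
  intro available desired _hdom hpre
  show count_possible available desired = count_possible_alt available desired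
  have hndl : (available.map String.toList).Nodup :=
    hpre.map (fun _ _ h => String.toList_injective h)
  have hpnd : (piecesOf (available.map String.toList)).Nodup :=
    List.Nodup.filter _ hndl
  obtain ⟨hinv, hall⟩ := initPoss_spec (available.map String.toList) hndl hpnd
  exact desired_spec (available.map String.toList) hpnd desired 0 0
    (initPoss (available.map String.toList)) hinv hall
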